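-- pv_equiv track=rewrite | github.com/databrickslabs/ontobricks | src/back/core/graph_analysis/CohortBuilder.py | _fetch_attrs_for_props
-- ===== SOURCE A (Python) =====
-- from typing import Any, Callable, Dict, Iterable, List, Optional, Set, Tuple
--
-- def _fetch_attrs_for_props(
--
--     triples: List[Dict[str, str]],
--     members: Set[str],
--     props: List[str],
-- ) -> Dict[str, Dict[str, Any]]:
--     if not props:
--         return {}
--     prop_set = set(props)
--     attrs: Dict[str, Dict[str, Any]] = {p: {} for p in prop_set}
--     for t in triples:
--         pred = t.get("predicate")
--         if pred not in prop_set: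
--             continue
--         subj = t.get("subject")
--         if subj in members and subj not in attrs[pred]:
--             attrs[pred][subj] = t.get("object")
--     return attrs
-- ===== SOURCE B (Python) =====
-- def _fetch_attrs_for_props(triples, members, props):
--     if not props:
--         return {}
--     attrs = {}
--     for p in set(props):
--         found = {}
--         for t in triples:
--             if t.get("predicate") == p:
--                 s = t.get("subject")
--                 if s in members and s not in found:
--                     found[s] = t.get("object")
--         attrs[p] = found
--     return attrs
-- ===== Notes on version B (the rewrite author's own statement) =====
-- stated objective: alternative
-- what changed: Inverted loop nesting: instead of one predicate-gated pass over the triples updating all per-property dicts at once, B makes one forward scan over the triples per distinct property, building that property's first-object-per-member dict independently.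
import Mathlib
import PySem

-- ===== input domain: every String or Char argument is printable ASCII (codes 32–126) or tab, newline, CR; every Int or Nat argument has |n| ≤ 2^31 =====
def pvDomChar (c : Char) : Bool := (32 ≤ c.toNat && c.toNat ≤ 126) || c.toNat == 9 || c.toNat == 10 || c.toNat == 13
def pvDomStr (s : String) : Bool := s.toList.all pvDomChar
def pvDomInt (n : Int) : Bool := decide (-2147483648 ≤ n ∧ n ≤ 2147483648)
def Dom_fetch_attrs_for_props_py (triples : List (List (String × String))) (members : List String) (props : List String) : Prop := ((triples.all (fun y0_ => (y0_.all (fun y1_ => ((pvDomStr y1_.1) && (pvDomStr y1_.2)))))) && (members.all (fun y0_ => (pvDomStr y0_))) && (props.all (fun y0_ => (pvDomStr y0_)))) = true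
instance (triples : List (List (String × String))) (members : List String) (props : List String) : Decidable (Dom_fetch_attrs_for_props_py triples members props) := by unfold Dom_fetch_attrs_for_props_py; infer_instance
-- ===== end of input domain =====

-- ===== PORT A =====
-- B replaces A's single predicate-gated pass over the triples by one forward scan
-- of the triples per distinct property (objective: alternative; same results).

-- t.get(key) on a triple dict (assoc list, first match)
def pvGetT (t : List (String × String)) (key : String) : Option String :=
  (PySem.Dict.mk t).get? key

-- the body of A's 'for t in triples' loop
def pvStepA (propSet : PySem.Set String) (members : List String)
    (attrs : PySem.Dict String (PySem.Dict String (Option String)))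
    (t : List (String × String)) : PySem.Dict String (PySem.Dict String (Option String)) :=
  match pvGetT t "predicate" with
  | none => attrs            -- 'pred not in prop_set': None is never in a set of strings
  | some pred =>
    if pred ∈ propSet then
      match pvGetT t "subject" with
      | none => attrs        -- subj = None: 'subj in members' is False
      | some subj =>
        if subj ∈ members ∧ (attrs.getD pred PySem.Dict.empty).contains subj = false then
          -- attrs[pred][subj] = t.get("object"); pred is always a key of attrs here,
          -- so getD with an empty default is only a totality guard
          attrs.insert pred ((attrs.getD pred PySem.Dict.empty).insert subj (pvGetT t "object"))
        else attrs
    else attrs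

def fetch_attrs_for_props_py (triples : List (List (String × String))) (members : List String) (props : List String) : List (String × List (String × Option String)) :=
  if props = [] then []
  else
    let propSet : PySem.Set String := PySem.Set.ofList props
    -- attrs = {p: {} for p in prop_set}
    let attrs0 : PySem.Dict String (PySem.Dict String (Option String)) :=
      propSet.foldl (fun d p => d.insert p PySem.Dict.empty) PySem.Dict.empty
    let attrs := triples.foldl (pvStepA propSet members) attrs0
    attrs.items.map (fun pd => (pd.1, pd.2.items))

-- ===== PORT B =====
-- the body of B's inner 'for t in triples' loop for one property p
def pvStepB (members : List String) (p : String)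
    (found : PySem.Dict String (Option String))
    (t : List (String × String)) : PySem.Dict String (Option String) :=
  if pvGetT t "predicate" = some p then
    match pvGetT t "subject" with
    | none => found
    | some s =>
      if s ∈ members ∧ found.contains s = false then
        found.insert s (pvGetT t "object")
      else found
  else found

-- B's inner loop: scan the triples once for property p
def pvInnerB (triples : List (List (String × String))) (members : List String)
    (p : String) : PySem.Dict String (Option String) :=
  triples.foldl (pvStepB members p) PySem.Dict.empty

def fetch_attrs_for_props_py_alt (triples : List (List (String × String))) (members : List String) (props : List String) : List (String × List (String × Option String)) :=
  if props = [] then []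
  else
    ((PySem.Set.ofList props).foldl
        (fun attrs p => attrs.insert p (pvInnerB triples members p)) PySem.Dict.empty).items.map
      (fun pd => (pd.1, pd.2.items))

-- ===== PRECONDITION & SPEC =====
def Spec_fetch_attrs_for_props_py (triples : List (List (String × String))) (members : List String) (props : List String) (out : List (String × List (String × Option String))) : Prop := out = fetch_attrs_for_props_py_alt triples members props
instance (triples : List (List (String × String))) (members : List String) (props : List String) (out : List (String × List (String × Option String))) : Decidable (Spec_fetch_attrs_for_props_py triples members props out) := by unfold Spec_fetch_attrs_for_props_py; infer_instance

-- ===== CLAIM (what is proved, stated in full; the proofs are below) =====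
def Claim_equal_fetch_attrs_for_props_py : Prop := ∀ (triples : List (List (String × String))) (members : List String) (props : List String), Dom_fetch_attrs_for_props_py triples members props → Spec_fetch_attrs_for_props_py triples members props (fetch_attrs_for_props_py triples members props)

-- ===== LEMMAS AND PROOFS =====

-- one step of A's pass acts on the items list exactly like one step of each of B's per-property loops
theorem pvStep_items (ks : List String) (hnd : ks.Nodup) (members : List String)
    (g : String → PySem.Dict String (Option String))
    (d : PySem.Dict String (PySem.Dict String (Option String)))
    (hd : d.items = ks.map (fun p => (p, g p))) (t : List (String × String)) :
    (pvStepA ks members d t).items = ks.map (fun p => (p, pvStepB members p (g p) t)) := by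
  have hkeys : d.keys = ks := by
    simp [PySem.Dict.keys, hd, Function.comp_def]
  have hknd : d.keys.Nodup := hkeys ▸ hnd
  unfold pvStepA pvStepB
  cases hp : pvGetT t "predicate" with
  | none => simp [hd]
  | some pred =>
    by_cases hmem : pred ∈ ks
    · have hgd : d.getD pred PySem.Dict.empty = g pred :=
        PySem.Dict.getD_of_mem_items _
          (by rw [hd]; exact List.mem_map.mpr ⟨pred, hmem, rfl⟩) hknd PySem.Dict.empty
      simp only [hmem, if_true, hgd]
      cases hs : pvGetT t "subject" with
      | none => simp [hd]
      | some subj =>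
        dsimp only
        by_cases hc : subj ∈ members ∧ (g pred).contains subj = false
        · have hcont : d.contains pred = true := by
            rw [PySem.Dict.contains_eq_decide_mem_keys, hkeys]; simpa using hmem
          rw [if_pos hc, PySem.Dict.items_insert, if_pos hcont, hd, List.map_map]
          apply List.map_congr_left
          intro p _
          by_cases hpe : p = pred
          · subst hpe; simp [hc]
          · simp [hpe, (by simpa [eq_comm] using hpe : ¬ pred = p)]
        · rw [if_neg hc, hd]
          apply List.map_congr_left
          intro p _
          by_cases hpe : p = pred
          · subst hpe; simp [hc]
          · simp [(by simpa [eq_comm] using hpe : ¬ pred = p)]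
    · simp only [hmem, if_false, hd]
      apply List.map_congr_left
      intro p hp'
      have : ¬ pred = p := fun h => hmem (h ▸ hp')
      simp [this]

-- folding A's pass over the triples, started from any dict whose items are ks.map (p, g p),
-- yields itemwise the per-property folds of B
theorem pvFold_items (ts : List (List (String × String))) (ks : List String) (hnd : ks.Nodup)
    (members : List String) (g : String → PySem.Dict String (Option String))
    (d : PySem.Dict String (PySem.Dict String (Option String)))
    (hd : d.items = ks.map (fun p => (p, g p))) :
    (ts.foldl (pvStepA ks members) d).items
      = ks.map (fun p => (p, ts.foldl (pvStepB members p) (g p))) := by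
  induction ts generalizing d g with
  | nil => simpa using hd
  | cons t ts ih =>
    simp only [List.foldl_cons]
    exact ih (fun p => pvStepB members p (g p) t) _ (pvStep_items ks hnd members g d hd t)

theorem pvInit_items (ks : List String) (hnd : ks.Nodup) :
    (ks.foldl (fun (d : PySem.Dict String (PySem.Dict String (Option String))) p => d.insert p PySem.Dict.empty) PySem.Dict.empty).items
      = ks.map (fun p => (p, PySem.Dict.empty)) := by
  have := PySem.Dict.items_foldl_insert_fresh ks (k := id)
    (v := fun _ => (PySem.Dict.empty : PySem.Dict String (Option String)))
    (d := PySem.Dict.empty) (by intro a _; simp) (by simpa using hnd)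
  simpa using this

theorem pvAlt_items (triples : List (List (String × String))) (members : List String)
    (ks : List String) (hnd : ks.Nodup) :
    (ks.foldl (fun attrs p => attrs.insert p (pvInnerB triples members p)) PySem.Dict.empty).items
      = ks.map (fun p => (p, pvInnerB triples members p)) := by
  have := PySem.Dict.items_foldl_insert_fresh ks (k := id)
    (v := fun p => pvInnerB triples members p) (d := PySem.Dict.empty)
    (by intro a _; simp) (by simpa using hnd)
  simpa using this

-- ===== VERDICT (by name: the statement is the Claim_ definition above) =====
theorem fetch_attrs_for_props_py_spec : Claim_equal_fetch_attrs_for_props_py := by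
  intro triples members props _
  unfold Spec_fetch_attrs_for_props_py fetch_attrs_for_props_py fetch_attrs_for_props_py_alt
  by_cases hp : props = []
  · simp [hp]
  · simp only [hp, if_false]
    have hnd : (PySem.Set.ofList props).Nodup := PySem.Set.nodup_ofList props
    rw [pvFold_items triples (PySem.Set.ofList props) hnd members (fun _ => PySem.Dict.empty) _
          (pvInit_items _ hnd),
        pvAlt_items triples members _ hnd]
    rfl
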